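-- pv_equiv track=rewrite | github.com/secdev/scapy | scapy/contrib/igmpv3.py | float_encode
-- ===== SOURCE A (Python) =====
-- def float_encode(value):
--     """Convert the integer value to its IGMPv3 encoded time value if
--         needed.
--
--     As defined in tools.ietf.org/html/rfc3376#section-4.1.1
--
--     If value < min_val, return the value specified. If >= min_val, encode
--     as a floating point value. Value can be 0 - 31744.
--     """
--     min_val = 128
--     max_val = 31743
--     counter = 31
--     if value < min_val:
--         code = value
--     elif value > max_val:
--         code = 255
--     else:
--         exp = 0
--         value >>= 3
--         while (value > counter):
--             exp += 1
--             value >>= 1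
--         exp <<= 4
--         code = 0x80 | exp | (value & 0x0F)
--     return code
-- ===== SOURCE B (Python) =====
-- def float_encode(value):
--     """Convert the integer value to its IGMPv3 encoded time value if
--         needed.
--
--     Same three-way guard as the original; the halving loop is replaced
--     by a closed form using bit_length.
--     """
--     if value < 128:
--         return value
--     if value > 31743:
--         return 255
--     v = value >> 3
--     exp = v.bit_length() - 5
--     return 0x80 | (exp << 4) | ((v >> exp) & 0x0F)
-- ===== Notes on version B (the rewrite author's own statement) =====
-- stated objective: simpler
-- what changed: The iterative halving loop that finds the exponent is replaced by a closed form exp = (value>>3).bit_length() - 5, with the mantissa obtained by a single shift.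
import Mathlib
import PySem

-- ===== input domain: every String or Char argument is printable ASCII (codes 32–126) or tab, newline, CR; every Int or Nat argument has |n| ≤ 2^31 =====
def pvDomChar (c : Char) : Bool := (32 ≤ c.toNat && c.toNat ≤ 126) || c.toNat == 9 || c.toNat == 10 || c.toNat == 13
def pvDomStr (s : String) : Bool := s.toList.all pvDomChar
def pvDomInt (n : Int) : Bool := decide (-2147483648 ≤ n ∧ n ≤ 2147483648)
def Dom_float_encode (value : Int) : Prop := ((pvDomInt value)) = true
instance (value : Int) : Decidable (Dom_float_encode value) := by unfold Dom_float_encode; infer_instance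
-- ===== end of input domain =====

-- B replaces A's iterative halving loop by a closed-form exponent from bit_length (objective: simpler).


-- ===== PORT A =====
-- A's 'while (value > counter): exp += 1; value >>= 1' loop (counter = 31)
def floatLoopA (exp : Int) (v : Int) : Int × Int :=
  if h : v > 31 then floatLoopA (exp + 1) (v >>> (1 : Nat)) else (exp, v)
termination_by v.toNat
decreasing_by
  have : v >>> (1 : Nat) = v / 2 := by simp [Int.shiftRight_eq_div_pow]
  omega

def float_encode (value : Int) : Int :=
  if value < 128 then value
  else if value > 31743 then 255
  else
    let p := floatLoopA 0 (value >>> (3 : Nat))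
    PySem.Int.bor 0x80 (PySem.Int.bor (p.1 <<< (4 : Nat)) (PySem.Int.band p.2 0x0F))

-- ===== PORT B =====
def float_encode_alt (value : Int) : Int :=
  if value < 128 then value
  else if value > 31743 then 255
  else
    let v := value >>> (3 : Nat)
    let exp : Nat := PySem.Int.bitLength v - 5
    PySem.Int.bor 0x80 (PySem.Int.bor ((exp : Int) <<< (4 : Nat)) (PySem.Int.band (v >>> exp) 0x0F))

-- ===== PRECONDITION & SPEC =====
def Spec_float_encode (value : Int) (out : Int) : Prop := out = float_encode_alt value
instance (value : Int) (out : Int) : Decidable (Spec_float_encode value out) := by unfold Spec_float_encode; infer_instance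

-- ===== CLAIM (what is proved, stated in full; the proofs are below) =====
def Claim_equal_float_encode : Prop := ∀ (value : Int), Dom_float_encode value → Spec_float_encode value (float_encode value)

-- ===== LEMMAS AND PROOFS =====
-- bit_length of an integer in [16, 31] is 5
theorem bl5 (v : Int) (h1 : 16 ≤ v) (h2 : v ≤ 31) : PySem.Int.bitLength v = 5 := by
  have hne : v ≠ 0 := by omega
  have hlo := PySem.Int.two_pow_bitLength_le v hne
  have hhi := PySem.Int.lt_two_pow_bitLength v
  have hab : v.natAbs ≤ 31 ∧ 16 ≤ v.natAbs := by omega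
  set b := PySem.Int.bitLength v with hb
  by_contra hne5
  rcases Nat.lt_or_ge b 5 with h | h
  · have : 2 ^ b ≤ 2 ^ 4 := Nat.pow_le_pow_right (by norm_num) (by omega)
    simp at this; omega
  · have h6 : 6 ≤ b := by omega
    have : 2 ^ 5 ≤ 2 ^ (b - 1) := Nat.pow_le_pow_right (by norm_num) (by omega)
    simp at this; omega

theorem bl_ge6 (v : Int) (h : 32 ≤ v) : 6 ≤ PySem.Int.bitLength v := by
  have hhi := PySem.Int.lt_two_pow_bitLength v
  by_contra hc
  have : 2 ^ PySem.Int.bitLength v ≤ 2 ^ 5 := Nat.pow_le_pow_right (by norm_num) (by omega)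
  simp at this; omega

-- A's loop returns exactly B's closed form: exp = bit_length v - 5, mantissa = v >> exp
theorem loop_spec : ∀ (n : Nat) (v : Int) (e : Int), v.toNat = n → 16 ≤ v →
    floatLoopA e v = (e + ((PySem.Int.bitLength v - 5 : Nat) : Int),
                      v >>> (PySem.Int.bitLength v - 5)) := by
  intro n
  induction n using Nat.strong_induction_on with
  | _ n ih =>
    intro v e hn h16
    by_cases h : v > 31
    · rw [floatLoopA, dif_pos h]
      have hhalf : v >>> (1 : Nat) = v / 2 := by simp [Int.shiftRight_eq_div_pow]
      have h16' : 16 ≤ v >>> (1 : Nat) := by rw [hhalf]; omega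
      have hlt : (v >>> (1 : Nat)).toNat < n := by rw [hhalf]; omega
      rw [ih _ hlt _ (e + 1) rfl h16']
      have hbl : PySem.Int.bitLength v = PySem.Int.bitLength (v >>> (1 : Nat)) + 1 := by
        rw [PySem.Int.bitLength_of_pos (by omega : (0:Int) < v),
            PySem.Int.floordiv_eq_ediv_of_pos (by norm_num : (0:Int) < 2), hhalf]
      have h6 : 6 ≤ PySem.Int.bitLength v := bl_ge6 v (by omega)
      have hk : PySem.Int.bitLength v - 5 = (PySem.Int.bitLength (v >>> (1:Nat)) - 5) + 1 := by omega
      rw [Prod.mk.injEq]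
      constructor
      · rw [hk]; push_cast; ring
      · rw [hk]
        simp only [Int.shiftRight_eq_div_pow]
        push_cast
        rw [Int.ediv_ediv_of_nonneg (by positivity), pow_succ]
        ring_nf
    · rw [floatLoopA, dif_neg h]
      have : PySem.Int.bitLength v = 5 := bl5 v h16 (by omega)
      simp [this]

-- ===== VERDICT (by name: the statement is the Claim_ definition above) =====
theorem float_encode_spec : Claim_equal_float_encode := by
  intro value _
  unfold Spec_float_encode float_encode float_encode_alt
  by_cases h1 : value < 128
  · simp [h1]
  · by_cases h2 : value > 31743
    · simp [h1, h2]
    · simp only [h1, h2, if_false]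
      have hv : value >>> (3 : Nat) = value / 8 := by
        simp [Int.shiftRight_eq_div_pow]
      have h16 : 16 ≤ value >>> (3 : Nat) := by rw [hv]; omega
      rw [loop_spec (value >>> (3 : Nat)).toNat _ 0 rfl h16]
      simp
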